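-- pv_equiv track=rewrite | github.com/Myakotnyy/1_semestr | 2.3.py | vnut
-- ===== SOURCE A (Python) =====
-- def vnut(a: str) -> bool:
--     flag2 = True
--
--     for i in range(len(a) - 1):
--         if (a[i] == '{') and ((a[i + 1] == ']') or (a[i + 1] == ')')):
--             flag2 = False
--         if (a[i] == '[') and ((a[i + 1] == '}') or (a[i + 1] == ')')):
--             flag2 = False
--         if (a[i] == '(') and ((a[i + 1] == ']') or (a[i + 1] == '}')):
--             flag2 = False
--
--     return flag2
-- ===== SOURCE B (Python) =====
-- FORBIDDEN = ("{]", "{)", "[}", "[)", "(]", "(}")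
--
--
-- def vnut(a: str) -> bool:
--     return not any(p in a for p in FORBIDDEN)
-- ===== Notes on version B (the rewrite author's own statement) =====
-- stated objective: idiomatic
-- what changed: Instead of scanning every adjacent character pair with three conditional blocks, B enumerates the six forbidden two-character substrings and asks whether any of them occurs in the string via Python's built-in substring search.
import Mathlib
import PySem

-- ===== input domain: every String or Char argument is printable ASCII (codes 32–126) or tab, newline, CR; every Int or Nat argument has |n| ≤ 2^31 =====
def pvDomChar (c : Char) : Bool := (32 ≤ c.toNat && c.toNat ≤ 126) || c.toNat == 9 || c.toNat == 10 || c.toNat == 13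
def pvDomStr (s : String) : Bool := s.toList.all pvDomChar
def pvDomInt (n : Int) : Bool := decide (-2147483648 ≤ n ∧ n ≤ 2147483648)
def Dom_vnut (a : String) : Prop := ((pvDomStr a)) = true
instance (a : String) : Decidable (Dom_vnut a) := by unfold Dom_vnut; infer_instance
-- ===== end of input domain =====

-- B replaces A's indexed scan of adjacent pairs (three conditional blocks) by six
-- substring searches: the string is valid iff none of the six forbidden two-character
-- substrings occurs in it (idiomatic; same linear cost).

-- ===== PORT A =====
-- 'for i in range(len(a)-1)': fold over pyRange; a[i]/a[i+1] via pyGetD (indices always in range here)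
def vnut (a : String) : Bool :=
  (PySem.List.pyRange 0 (PySem.Str.len a - 1) 1).foldl
    (fun flag2 i =>
      let ci := PySem.List.pyGetD a.toList i ' '
      let cn := PySem.List.pyGetD a.toList (i + 1) ' '
      let flag2 := if ci = '{' ∧ (cn = ']' ∨ cn = ')') then false else flag2
      let flag2 := if ci = '[' ∧ (cn = '}' ∨ cn = ')') then false else flag2
      let flag2 := if ci = '(' ∧ (cn = ']' ∨ cn = '}') then false else flag2
      flag2)
    true

-- ===== PORT B =====
-- FORBIDDEN = ("{]", "{)", "[}", "[)", "(]", "(}")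
def vnutForbidden : List (List Char) :=
  [['{', ']'], ['{', ')'], ['[', '}'], ['[', ')'], ['(', ']'], ['(', '}']]

-- 'not any(p in a for p in FORBIDDEN)'; 'p in a' is substring search
def vnut_alt (a : String) : Bool :=
  ! vnutForbidden.any (fun p => PySem.Chars.isIn p a.toList)

-- ===== PRECONDITION & SPEC =====
def Spec_vnut (a : String) (out : Bool) : Prop := out = vnut_alt a
instance (a : String) (out : Bool) : Decidable (Spec_vnut a out) := by unfold Spec_vnut; infer_instance

-- ===== CLAIM (what is proved, stated in full; the proofs are below) =====
def Claim_equal_vnut : Prop := ∀ (a : String), Dom_vnut a → Spec_vnut a (vnut a)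

-- ===== LEMMAS AND PROOFS =====

-- the boolean "this adjacent pair is bad", as A tests it
def vnutBad (x y : Char) : Bool :=
  decide (x = '{' ∧ (y = ']' ∨ y = ')')) ||
  decide (x = '[' ∧ (y = '}' ∨ y = ')')) ||
  decide (x = '(' ∧ (y = ']' ∨ y = '}'))

-- A's three nested ifs on one pair compose to 'flag && !bad'
lemma vnut_step (flag : Bool) (x y : Char) :
    (let f := if x = '{' ∧ (y = ']' ∨ y = ')') then false else flag
     let f := if x = '[' ∧ (y = '}' ∨ y = ')') then false else f
     let f := if x = '(' ∧ (y = ']' ∨ y = '}') then false else f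
     f) = (flag && !vnutBad x y) := by
  simp only [vnutBad]
  by_cases h1 : x = '{' ∧ (y = ']' ∨ y = ')') <;>
    by_cases h2 : x = '[' ∧ (y = '}' ∨ y = ')') <;>
      by_cases h3 : x = '(' ∧ (y = ']' ∨ y = '}') <;>
        simp [h1, h2, h3]

-- a flag-only-cleared fold is init && all
lemma foldl_and_all {α : Type} (g : α → Bool) :
    ∀ (L : List α) (init : Bool),
      L.foldl (fun f x => f && !g x) init = (init && L.all (fun x => !g x))
  | [], init => by simp
  | x :: L, init => by
    simp [List.foldl_cons, foldl_and_all g L, Bool.and_assoc]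

-- indexed all over range(n-1) = all over adjacent zip pairs
lemma range_all_eq_zip_all :
    ∀ (l : List Char),
      (List.range (l.length - 1)).all
          (fun k => !vnutBad (l.getD k ' ') (l.getD (k + 1) ' ')) =
        (l.zip l.tail).all (fun p => !vnutBad p.1 p.2)
  | [] => rfl
  | [x] => rfl
  | x :: y :: t => by
    have ih := range_all_eq_zip_all (y :: t)
    simp only [List.length_cons, Nat.add_sub_cancel] at ih ⊢
    rw [List.range_succ_eq_map, List.all_cons, List.all_map]
    simp only [Function.comp_def, List.getD_cons_succ] at ih ⊢
    rw [ih]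
    simp [List.zip]

-- a two-character list is an infix exactly when it is an adjacent pair
lemma infix_pair_iff_mem_zip (x y : Char) :
    ∀ (l : List Char), [x, y] <:+: l ↔ (x, y) ∈ l.zip l.tail
  | [] => by simp
  | [z] => by
    constructor
    · rintro ⟨s, t, h⟩
      have : ([z] : List Char).length = (s ++ [x, y] ++ t).length := by rw [h]
      simp at this; omega
    · simp [List.zip]
  | z :: w :: t => by
    rw [List.infix_cons_iff]
    constructor
    · rintro (⟨u, hu⟩ | h)
      · cases hu
        simp [List.zip]
      · have := (infix_pair_iff_mem_zip x y (w :: t)).mp h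
        simp [List.zip] at this ⊢
        tauto
    · intro h
      simp [List.zip] at h
      rcases h with ⟨hx, hy⟩ | h
      · subst hx; subst hy; exact Or.inl ⟨t, rfl⟩
      · exact Or.inr ((infix_pair_iff_mem_zip x y (w :: t)).mpr (by simp [List.zip]; exact h))

-- A's bad-pair test enumerates exactly B's six forbidden substrings
lemma bad_iff_mem_forbidden (x y : Char) :
    vnutBad x y = true ↔ [x, y] ∈ vnutForbidden := by
  simp [vnutBad, vnutForbidden]
  tauto

-- ===== VERDICT (by name: the statement is the Claim_ definition above) =====
theorem vnut_spec : Claim_equal_vnut := by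
  intro a _
  unfold Spec_vnut vnut vnut_alt
  have hlen : PySem.Str.len a = (a.toList.length : Int) := by
    simp [PySem.Str.len_eq]
  have hstep : (fun (flag2 : Bool) (i : Int) =>
      let ci := PySem.List.pyGetD a.toList i ' '
      let cn := PySem.List.pyGetD a.toList (i + 1) ' '
      let flag2 := if ci = '{' ∧ (cn = ']' ∨ cn = ')') then false else flag2
      let flag2 := if ci = '[' ∧ (cn = '}' ∨ cn = ')') then false else flag2
      let flag2 := if ci = '(' ∧ (cn = ']' ∨ cn = '}') then false else flag2
      flag2) = fun flag2 i => flag2 &&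
        !vnutBad (PySem.List.pyGetD a.toList i ' ')
          (PySem.List.pyGetD a.toList (i + 1) ' ') := by
    funext f i; exact vnut_step f _ _
  rw [hstep, foldl_and_all, Bool.true_and, hlen, PySem.List.pyRange_one]
  rw [List.all_map]
  have hto : (((a.toList.length : Int)) - 1 - 0).toNat = a.toList.length - 1 := by omega
  rw [hto]
  simp only [Function.comp_def]
  have hidx : ((List.range (a.toList.length - 1)).all fun k =>
        !vnutBad (PySem.List.pyGetD a.toList (0 + (k : Int)) ' ')
          (PySem.List.pyGetD a.toList (0 + (k : Int) + 1) ' ')) =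
      (List.range (a.toList.length - 1)).all
        (fun k => !vnutBad (a.toList.getD k ' ') (a.toList.getD (k + 1) ' ')) := by
    congr 1
    funext k
    simp only [show (0 : Int) + (k : Int) = ((k : Nat) : Int) by ring,
      PySem.List.pyGetD_natCast]
    rw [show ((k : Int) + 1) = ((k + 1 : Nat) : Int) by push_cast; ring,
      PySem.List.pyGetD_natCast]
  rw [hidx, range_all_eq_zip_all]
  -- both sides are now statements about adjacent pairs vs forbidden substrings
  rw [show (a.toList.zip a.toList.tail).all (fun p => !vnutBad p.1 p.2) =
      ! (a.toList.zip a.toList.tail).any (fun p => vnutBad p.1 p.2) by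
    simp [List.all_eq_not_any_not]]
  congr 1
  rcases h : (a.toList.zip a.toList.tail).any (fun p => vnutBad p.1 p.2) with _ | _
  · simp only [List.any_eq_false] at h
    rw [eq_comm, List.any_eq_false]
    intro p hp
    fin_cases hp <;>
      · intro hin
        rw [PySem.Chars.isIn_iff_infix] at hin
        exact h _ ((infix_pair_iff_mem_zip _ _ _).mp hin) (by decide)
  · simp only [List.any_eq_true] at h
    rw [eq_comm, List.any_eq_true]
    rcases h with ⟨⟨x, y⟩, hmem, hbad⟩
    exact ⟨[x, y], (bad_iff_mem_forbidden x y).mp hbad,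
      (PySem.Chars.isIn_iff_infix _ _).mpr ((infix_pair_iff_mem_zip x y _).mpr hmem)⟩
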